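-- pv_equiv track=rewrite | github.com/baoy-nlp/DSS-VAE-pytorch | utils/nn_funcs.py | input_transpose
-- ===== SOURCE A (Python) =====
-- def input_transpose(sents, pad_token):
--     """
--     transform the input List[sequence] of size (batch_size, max_sent_len)
--     into a list of size (max_sent_len, batch_size), with proper padding
--     """
--     max_len = max(len(s) for s in sents)
--     batch_size = len(sents)
--
--     seqs_t = []
--     masks = []
--     for i in range(max_len):
--         seqs_t.append([sents[k][i] if len(sents[k]) > i else pad_token for k in range(batch_size)])
--         masks.append([1 if len(sents[k]) > i else 0 for k in range(batch_size)])
--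
--     return seqs_t, masks
-- ===== SOURCE B (Python) =====
-- def input_transpose(sents, pad_token):
--     max_len = max(len(s) for s in sents)
--     padded = [list(s) + [pad_token] * (max_len - len(s)) for s in sents]
--     mask_rows = [[1] * len(s) + [0] * (max_len - len(s)) for s in sents]
--     seqs_t = [list(col) for col in zip(*padded)]
--     masks = [list(col) for col in zip(*mask_rows)]
--     return seqs_t, masks
-- ===== Notes on version B (the rewrite author's own statement) =====
-- stated objective: simpler
-- what changed: B pads each sentence once to a rectangular matrix and transposes it with zip(*...), instead of A's loop over positions with a per-cell length check for every (position, sentence) pair; the per-cell bounds tests disappear.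
import Mathlib
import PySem

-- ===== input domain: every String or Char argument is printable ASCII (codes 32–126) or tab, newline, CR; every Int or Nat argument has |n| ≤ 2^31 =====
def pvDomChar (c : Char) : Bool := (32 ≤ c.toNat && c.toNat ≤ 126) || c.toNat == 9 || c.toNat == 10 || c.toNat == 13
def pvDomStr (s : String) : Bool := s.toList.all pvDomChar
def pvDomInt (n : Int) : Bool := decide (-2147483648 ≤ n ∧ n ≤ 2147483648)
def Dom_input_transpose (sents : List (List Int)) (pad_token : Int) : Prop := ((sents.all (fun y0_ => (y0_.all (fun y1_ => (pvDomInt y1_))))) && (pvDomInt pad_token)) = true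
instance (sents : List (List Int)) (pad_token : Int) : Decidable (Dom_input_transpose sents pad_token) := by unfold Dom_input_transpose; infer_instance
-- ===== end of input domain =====

-- B pads each sentence to a rectangular matrix and transposes it with zip, instead of
-- A's loop over positions with a per-cell length check; objective: simpler decomposition.


-- ===== PORT A =====
-- A: max_len = max of lengths; for each position i, a row built by testing len(sents[k]) > i per cell.
def input_transpose (sents : List (List Int)) (pad_token : Int) : List (List Int) × List (List Int) :=
  let max_len : Nat := ((sents.map List.length).max?).getD 0  -- max(); Pre_ excludes the empty list where Python raises
  let seqs_t := (List.range max_len).map (fun i =>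
    sents.map (fun s => if i < s.length then s.getD i 0 else pad_token))
  let masks := (List.range max_len).map (fun i =>
    sents.map (fun s => if i < s.length then (1 : Int) else 0))
  (seqs_t, masks)

-- ===== PORT B =====
-- zip(*rows) on the rectangular matrix: take heads, recurse on tails, max_len times.
def pvZipT : Nat → List (List Int) → List (List Int)
  | 0, _ => []
  | n + 1, rows => rows.map (fun r => r.headD 0) :: pvZipT n (rows.map List.tail)

def input_transpose_alt (sents : List (List Int)) (pad_token : Int) : List (List Int) × List (List Int) :=
  let max_len : Nat := ((sents.map List.length).max?).getD 0
  let padded := sents.map (fun s => s ++ List.replicate (max_len - s.length) pad_token)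
  let mask_rows := sents.map (fun s => List.replicate s.length (1 : Int) ++ List.replicate (max_len - s.length) 0)
  (pvZipT max_len padded, pvZipT max_len mask_rows)

-- ===== PRECONDITION & SPEC =====
-- Pre_ excludes only the empty batch, on which Python's max() raises ValueError in both A and B.
def Pre_input_transpose (sents : List (List Int)) (pad_token : Int) : Prop := sents ≠ []
instance (sents : List (List Int)) (pad_token : Int) : Decidable (Pre_input_transpose sents pad_token) := by unfold Pre_input_transpose; infer_instance
def pvWitness_input_transpose : List (List Int) × Int := ([[1, 2, 3], [4]], 0)
def Spec_input_transpose (sents : List (List Int)) (pad_token : Int) (out : List (List Int) × List (List Int)) : Prop := out = input_transpose_alt sents pad_token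
instance (sents : List (List Int)) (pad_token : Int) (out : List (List Int) × List (List Int)) : Decidable (Spec_input_transpose sents pad_token out) := by unfold Spec_input_transpose; infer_instance

-- ===== CLAIM (what is proved, stated in full; the proofs are below) =====
def Claim_equal_input_transpose : Prop := ∀ (sents : List (List Int)) (pad_token : Int), Dom_input_transpose sents pad_token → Pre_input_transpose sents pad_token → Spec_input_transpose sents pad_token (input_transpose sents pad_token)

-- ===== LEMMAS AND PROOFS =====

/-- `pvZipT` is column extraction: the `i`-th output row reads cell `i` of every row. -/
theorem pvZipT_eq (n : Nat) (rows : List (List Int)) :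
    pvZipT n rows = (List.range n).map (fun i => rows.map (fun r => (r.drop i).headD 0)) := by
  induction n generalizing rows with
  | zero => simp [pvZipT]
  | succ n ih =>
    rw [pvZipT, ih, List.range_succ_eq_map]
    simp only [List.map_cons, List.map_map, List.drop_zero]
    refine congrArg₂ _ rfl ?_
    refine List.map_congr_left (fun i _ => ?_)
    simp only [Function.comp]
    refine List.map_congr_left (fun r _ => ?_)
    have : r.tail.drop i = r.drop (i + 1) := by
      rw [← List.drop_one, List.drop_drop]; ring_nf
    simp [Function.comp, this]

theorem cell_seq (s : List Int) (pad : Int) (m i : Nat) (hi : i < m) :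
    ((s ++ List.replicate (m - s.length) pad).drop i).headD 0
      = if i < s.length then s.getD i 0 else pad := by
  rw [List.headD_eq_head?_getD, List.head?_drop]
  by_cases h : i < s.length
  · rw [List.getElem?_append_left h]
    simp [h, List.getD]
  · rw [List.getElem?_append_right (by omega)]
    have : i - s.length < m - s.length := by omega
    simp [this, h]

theorem cell_mask (s : List Int) (m i : Nat) (hi : i < m) :
    ((List.replicate s.length (1 : Int) ++ List.replicate (m - s.length) 0).drop i).headD 0
      = if i < s.length then (1 : Int) else 0 := by
  rw [List.headD_eq_head?_getD, List.head?_drop]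
  by_cases h : i < s.length
  · rw [List.getElem?_append_left (by simpa using h)]
    simp [h]
  · rw [List.getElem?_append_right (by simpa using not_lt.mp h)]
    have : i - s.length < m - s.length := by omega
    simp [this, h]

-- ===== VERDICT (by name: the statement is the Claim_ definition above) =====
theorem input_transpose_spec : Claim_equal_input_transpose := by
  intro sents pad_token _ _
  unfold Spec_input_transpose input_transpose input_transpose_alt
  dsimp only
  rw [pvZipT_eq, pvZipT_eq]
  refine Prod.ext ?_ ?_ <;>
  · refine List.map_congr_left (fun i hi => ?_)
    rw [List.mem_range] at hi
    rw [List.map_map]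
    refine List.map_congr_left (fun s _ => ?_)
    simp only [Function.comp]
    first
      | exact (cell_seq s pad_token _ i hi).symm
      | exact (cell_mask s _ i hi).symm
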